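-- pv_equiv track=rewrite | github.com/GeekSky98/Algorithm_lab | Baekjoon/Silver/에라토스테네스의 체/explanation.py | era
-- ===== SOURCE A (Python) =====
-- def era(num, k):
--     prime = [1] * (num + 1)
--     cnt = 0
--     for i in range(2, num+1):
--         if prime[i]:
--             for j in range(i, num + 1, i):
--                 if prime[j]:
--                     prime[j] = 0
--                     cnt += 1
--                     if cnt == k:
--                         return j
-- ===== SOURCE B (Python) =====
-- def era(num, k):
--     spf = [0] * (num + 1)
--     for i in range(2, num + 1):
--         if spf[i] == 0:
--             for j in range(i, num + 1, i):
--                 if spf[j] == 0: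
--                     spf[j] = i
--     cands = sorted(range(2, num + 1), key=lambda v: (spf[v], v))
--     if 1 <= k <= len(cands):
--         return cands[k - 1]
--     return None
-- ===== Notes on version B (the rewrite author's own statement) =====
-- stated objective: alternative
-- what changed: Replaces the early-returning destructive sieve with a counter by a pure characterisation: build a smallest-prime-factor table, sort the candidates 2..num by the key (spf, value) -- which is exactly the sieve's marking order -- and index the k-th element, returning None for out-of-range k.
import Mathlib
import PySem

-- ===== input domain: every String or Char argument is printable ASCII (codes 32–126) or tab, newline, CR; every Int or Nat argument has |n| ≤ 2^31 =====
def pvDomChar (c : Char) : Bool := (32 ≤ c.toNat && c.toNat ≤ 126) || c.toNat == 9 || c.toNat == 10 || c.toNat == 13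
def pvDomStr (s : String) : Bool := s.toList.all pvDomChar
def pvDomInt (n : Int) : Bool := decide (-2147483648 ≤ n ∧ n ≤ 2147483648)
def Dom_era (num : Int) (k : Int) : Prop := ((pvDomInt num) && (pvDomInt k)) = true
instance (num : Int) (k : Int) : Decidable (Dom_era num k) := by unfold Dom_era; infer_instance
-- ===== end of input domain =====

-- B replaces A's early-returning counting sieve by a pure characterisation: build a smallest-prime-factor
-- table, sort 2..num by (spf, value) — the sieve's exact marking order — and index the k-th
-- (objective: alternative).

-- ===== PORT A =====
-- Python lists used only as integer-indexed sieve tables are ported as Array Int (getD/setIfInBounds are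
-- exact for the in-range indices these loops use; every index here is provably in range).
-- inner 'for j in range(i, num+1, i)' loop; .error j = the 'return j' early exit
def eraInner (k : Int) (js : List Int) (p : Array Int) (c : Int) : Except Int (Array Int × Int) :=
  match js with
  | [] => .ok (p, c)
  | j :: rest =>
    if p.getD j.toNat 0 ≠ 0 then                      -- 'if prime[j]:'
      let p' := p.setIfInBounds j.toNat 0             -- 'prime[j] = 0'
      let c' := c + 1
      if c' = k then .error j else eraInner k rest p' c'
    else eraInner k rest p c

-- outer 'for i in range(2, num+1)' loop
def eraOuter (num k : Int) (is : List Int) (p : Array Int) (c : Int) : Option Int :=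
  match is with
  | [] => none
  | i :: rest =>
    if p.getD i.toNat 0 ≠ 0 then                      -- 'if prime[i]:'
      match eraInner k (PySem.List.pyRange i (num + 1) i) p c with
      | .error j => some j
      | .ok (p', c') => eraOuter num k rest p' c'
    else eraOuter num k rest p c

def era (num : Int) (k : Int) : Option Int :=
  eraOuter num k (PySem.List.pyRange 2 (num + 1) 1)
    (Array.replicate (num + 1).toNat 1) 0             -- 'prime = [1] * (num + 1)' (empty when num+1 ≤ 0, as in Python)

-- ===== PORT B =====
-- inner 'for j in range(i, num+1, i)' loop of the spf sieve
def spfInner (i : Int) (js : List Int) (t : Array Int) : Array Int :=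
  match js with
  | [] => t
  | j :: rest =>
    if t.getD j.toNat 0 = 0 then spfInner i rest (t.setIfInBounds j.toNat i)   -- 'if spf[j] == 0: spf[j] = i'
    else spfInner i rest t

-- outer 'for i in range(2, num+1)' loop of the spf sieve
def spfOuter (num : Int) (is : List Int) (t : Array Int) : Array Int :=
  match is with
  | [] => t
  | i :: rest =>
    if t.getD i.toNat 0 = 0 then                      -- 'if spf[i] == 0:'
      spfOuter num rest (spfInner i (PySem.List.pyRange i (num + 1) i) t)
    else spfOuter num rest t

def era_alt (num : Int) (k : Int) : Option Int :=
  let spf := spfOuter num (PySem.List.pyRange 2 (num + 1) 1)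
    (Array.replicate (num + 1).toNat 0)               -- 'spf = [0] * (num + 1)'
  -- 'sorted(range(2, num+1), key=lambda v: (spf[v], v))' ported as the standard decorate / stable
  -- mergesort / undecorate with Python's lexicographic tuple order (keys here are distinct, so the
  -- stable sort is determined by the order alone)
  let cands := (((PySem.List.pyRange 2 (num + 1) 1).map (fun v => (spf.getD v.toNat 0, v))).mergeSort
      (fun a b => decide (a.1 < b.1 ∨ (a.1 = b.1 ∧ a.2 ≤ b.2)))).map (fun x => x.2)
  if 1 ≤ k ∧ k ≤ (cands.length : Int) then PySem.List.pyGet? cands (k - 1) else none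

-- ===== PRECONDITION & SPEC =====
def Spec_era (num : Int) (k : Int) (out : Option Int) : Prop := out = era_alt num k
instance (num : Int) (k : Int) (out : Option Int) : Decidable (Spec_era num k out) := by unfold Spec_era; infer_instance

-- ===== CLAIM (what is proved, stated in full; the proofs are below) =====
def Claim_equal_era : Prop := ∀ (num : Int) (k : Int), Dom_era num k → Spec_era num k (era num k)

-- ===== LEMMAS AND PROOFS =====

-- (num:Int)'s smallest prime factor, as an Int
def minFacI (j : Int) : Int := ((j.toNat.minFac : Nat) : Int)

-- the j's struck during the pass for i, in order
def blockL (num i : Int) : List Int :=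
  (PySem.List.pyRange i (num + 1) i).filter (fun j => decide (minFacI j = i))

def marksFrom (num i : Int) : List Int :=
  (PySem.List.pyRange i (num + 1) 1).flatMap (fun i' => blockL num i')

def marks (num : Int) : List Int := marksFrom num 2

-- the k-th struck number (1-based), none when out of range
def pick (l : List Int) (t : Int) : Option Int :=
  if 1 ≤ t ∧ t ≤ (l.length : Int) then some (PySem.List.pyGetD l (t - 1) 0) else none

-- sieve-state invariant before the outer pass for i (A's prime table)
def SieveInv (num i : Int) (p : Array Int) : Prop :=
  p.size = (num + 1).toNat ∧
  ∀ (m : Nat) (h : m < p.size), p[m] = if 2 ≤ m ∧ ((m.minFac : Int) < i) then (0 : Int) else 1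

-- spf-table invariant before the outer pass for i (B's spf table)
def SpfInv (num i : Int) (t : Array Int) : Prop :=
  t.size = (num + 1).toNat ∧
  ∀ (m : Nat) (h : m < t.size), t[m] = if 2 ≤ m ∧ ((m.minFac : Int) < i) then (m.minFac : Int) else 0

-- Array.getD spelled as a dependent if, and its behaviour under setIfInBounds at another index
lemma agetD_char (p : Array Int) (i : Nat) : p.getD i 0 = if h : i < p.size then p[i] else 0 := by
  by_cases h : i < p.size
  · rw [dif_pos h]
    exact (Array.getElem_eq_getD 0).symm
  · rw [dif_neg h]
    unfold Array.getD
    rw [dif_neg h]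

lemma agetD_set_ne (p : Array Int) (a b : Nat) (v : Int) (h : a ≠ b) :
    (p.setIfInBounds a v).getD b 0 = p.getD b 0 := by
  rw [agetD_char, agetD_char]
  by_cases hb : b < p.size
  · rw [dif_pos (by rwa [Array.size_setIfInBounds]), dif_pos hb]
    rw [Array.getElem_setIfInBounds hb, if_neg h]
  · rw [dif_neg (by rwa [Array.size_setIfInBounds]), dif_neg hb]

lemma pick_nil (t : Int) : pick [] t = none := by
  simp [pick]
  omega

lemma pick_append (a b : List Int) (t : Int) :
    pick (a ++ b) t =
      if 1 ≤ t ∧ t ≤ (a.length : Int) then some (PySem.List.pyGetD a (t - 1) 0)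
      else pick b (t - a.length) := by
  unfold pick
  rcases Nat.lt_or_ge 0 1 with _ | _
  · by_cases h1 : 1 ≤ t ∧ t ≤ (a.length : Int)
    · have h0 : (0:Int) ≤ t - 1 := by omega
      have hlt : t - 1 < ((a ++ b).length : Int) := by simp; omega
      have hlt' : t - 1 < (a.length : Int) := by omega
      rw [if_pos h1, if_pos (by simp; omega)]
      rw [PySem.List.pyGetD_eq_getElem _ _ h0 hlt, PySem.List.pyGetD_eq_getElem _ _ h0 hlt']
      congr 1
      exact List.getElem_append_left (by omega)
    · rw [if_neg h1]
      by_cases h2 : 1 ≤ t - a.length ∧ t - a.length ≤ (b.length : Int)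
      · have h0 : (0:Int) ≤ t - 1 := by omega
        have hlt : t - 1 < ((a ++ b).length : Int) := by simp; omega
        have h0' : (0:Int) ≤ t - a.length - 1 := by omega
        have hlt' : t - a.length - 1 < (b.length : Int) := by omega
        rw [if_pos (by simp; omega), if_pos h2]
        rw [PySem.List.pyGetD_eq_getElem _ _ h0 hlt, PySem.List.pyGetD_eq_getElem _ _ h0' hlt']
        congr 1
        rw [List.getElem_append_right (by omega)]
        congr 1
        omega
      · rw [if_neg (by simp; omega), if_neg h2]
  · omega

lemma pyRange_pairwise_of_pos (a b s : Int) (hs : 0 < s) :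
    (PySem.List.pyRange a b s).Pairwise (· < ·) := by
  rw [PySem.List.pyRange_of_pos a b hs]
  rw [List.pairwise_map]
  refine List.Pairwise.imp_of_mem (R := (· < ·)) ?_ (List.pairwise_lt_range)
  intro x y _ _ hxy
  have hxy' : (x:Int) < y := by exact_mod_cast hxy
  show a + s * x < a + s * y
  nlinarith

lemma minFacI_facts (j : Int) (hj : 2 ≤ j) :
    2 ≤ minFacI j ∧ minFacI j ≤ j ∧ minFacI j ∣ j := by
  have h2 : 2 ≤ j.toNat := by omega
  have hne : j.toNat ≠ 1 := by omega
  have hp := Nat.minFac_prime hne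
  have hle : j.toNat.minFac ≤ j.toNat := Nat.minFac_le (by omega)
  have hdvd : j.toNat.minFac ∣ j.toNat := Nat.minFac_dvd _
  unfold minFacI
  refine ⟨?_, ?_, ?_⟩
  · exact_mod_cast hp.two_le
  · calc ((j.toNat.minFac : Nat) : Int) ≤ (j.toNat : Int) := by exact_mod_cast hle
      _ = j := by omega
  · have h5 : ((j.toNat.minFac : Nat) : Int) ∣ ((j.toNat : Nat) : Int) := Int.natCast_dvd_natCast.mpr hdvd
    have hj' : ((j.toNat : Nat) : Int) = j := by omega
    rwa [hj'] at h5

lemma mem_blockL (num i x : Int) (hi : 0 < i) :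
    x ∈ blockL num i ↔ i ≤ x ∧ x ≤ num ∧ i ∣ x ∧ minFacI x = i := by
  unfold blockL
  rw [List.mem_filter]
  rw [PySem.List.mem_pyRange_iff_of_pos hi]
  constructor
  · rintro ⟨⟨h1, h2, h3⟩, h4⟩
    have h4' : minFacI x = i := by simpa using h4
    have hdx : i ∣ x := dvd_sub_self_right.mp h3
    exact ⟨h1, by omega, hdx, h4'⟩
  · rintro ⟨h1, h2, h3, h4⟩
    have h3' : i ∣ x - i := dvd_sub h3 (dvd_refl i)
    exact ⟨⟨h1, by omega, h3'⟩, by simpa using h4⟩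

lemma mem_marks (num x : Int) : x ∈ marks num ↔ 2 ≤ x ∧ x ≤ num := by
  unfold marks marksFrom
  rw [List.mem_flatMap]
  constructor
  · rintro ⟨i, hi, hx⟩
    rw [PySem.List.mem_pyRange_one] at hi
    have := (mem_blockL num i x (by omega)).mp hx
    omega
  · rintro ⟨h1, h2⟩
    refine ⟨minFacI x, ?_, ?_⟩
    · rw [PySem.List.mem_pyRange_one]
      have := minFacI_facts x h1
      omega
    · have hf := minFacI_facts x h1
      rw [mem_blockL num _ x (by omega)]
      exact ⟨by omega, h2, hf.2.2, rfl⟩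

lemma marks_pairwise (num : Int) :
    (marks num).Pairwise (fun a b => minFacI a < minFacI b ∨ (minFacI a = minFacI b ∧ a < b)) := by
  unfold marks marksFrom
  rw [List.pairwise_flatMap]
  constructor
  · intro i hi
    rw [PySem.List.mem_pyRange_one] at hi
    refine List.Pairwise.imp_of_mem ?_ ((pyRange_pairwise_of_pos i (num+1) i (by omega)).filter _)
    intro a b ha hb hab
    have ha' := (mem_blockL num i a (by omega)).mp ha
    have hb' := (mem_blockL num i b (by omega)).mp hb
    exact Or.inr ⟨by rw [ha'.2.2.2, hb'.2.2.2], hab⟩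
  · refine List.Pairwise.imp_of_mem ?_ (pyRange_pairwise_of_pos 2 (num+1) 1 (by omega))
    intro i1 i2 h1 h2 h12 x hx y hy
    rw [PySem.List.mem_pyRange_one] at h1 h2
    have hx' := (mem_blockL num i1 x (by omega)).mp hx
    have hy' := (mem_blockL num i2 y (by omega)).mp hy
    exact Or.inl (by rw [hx'.2.2.2, hy'.2.2.2]; exact h12)

lemma marks_perm (num : Int) : (marks num).Perm (PySem.List.pyRange 2 (num + 1) 1) := by
  have hnd : (marks num).Nodup := by
    refine List.Pairwise.imp ?_ (marks_pairwise num)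
    rintro a b h rfl
    rcases h with h | h
    · omega
    · omega
  refine (List.perm_ext_iff_of_nodup hnd (PySem.List.nodup_pyRange_one 2 (num+1))).mpr ?_
  intro x
  rw [mem_marks, PySem.List.mem_pyRange_one]
  omega

lemma afoldl_set_size (l : List Int) (p : Array Int) :
    (l.foldl (fun q j => q.setIfInBounds j.toNat 0) p).size = p.size := by
  induction l generalizing p with
  | nil => rfl
  | cons j l ih =>
    simp only [List.foldl_cons]
    rw [ih]
    exact Array.size_setIfInBounds

lemma afoldl_set_get? (l : List Int) (p : Array Int) (m : Nat)
    (hl : ∀ j ∈ l, 0 ≤ j ∧ j < (p.size : Int)) :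
    (l.foldl (fun q j => q.setIfInBounds j.toNat 0) p)[m]? =
      if (m : Int) ∈ l then some 0 else p[m]? := by
  induction l generalizing p with
  | nil => simp
  | cons j l ih =>
    simp only [List.foldl_cons]
    have hj := hl j (by simp)
    have hlen : (p.setIfInBounds j.toNat 0).size = p.size := Array.size_setIfInBounds
    rw [ih (p.setIfInBounds j.toNat 0) (by rw [hlen]; intro x hx; exact hl x (by simp [hx]))]
    by_cases hml : (m : Int) ∈ l
    · rw [if_pos hml, if_pos (by simp [hml])]
    · rw [if_neg hml]
      by_cases hmj : (m : Int) = j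
      · have hmj' : j.toNat = m := by omega
        rw [if_pos (by simp [hmj]), Array.getElem?_setIfInBounds, if_pos hmj', if_pos (by omega)]
      · have hmj' : j.toNat ≠ m := by omega
        rw [if_neg (by simp [hmj, hml]), Array.getElem?_setIfInBounds, if_neg hmj']

lemma pyGetD_cons_of_pos (x : Int) (xs : List Int) (t d : Int) (h : 1 ≤ t) :
    PySem.List.pyGetD (x :: xs) t d = PySem.List.pyGetD xs (t - 1) d := by
  unfold PySem.List.pyGetD
  have e : t = ((t - 1).toNat : Int) + 1 := by omega
  rw [e, PySem.List.pyGet?_cons_succ]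
  have e2 : (((t - 1).toNat : Nat) : Int) = t - 1 := by omega
  rw [e2]
  norm_num

lemma inner_lemma (k : Int) : ∀ (js : List Int) (p : Array Int) (c : Int),
    js.Nodup → (∀ j ∈ js, 0 ≤ j ∧ j < (p.size : Int)) →
    eraInner k js p c =
      (if 1 ≤ k - c ∧ k - c ≤ ((js.filter (fun j => decide (p.getD j.toNat 0 ≠ 0))).length : Int) then
         Except.error (PySem.List.pyGetD (js.filter (fun j => decide (p.getD j.toNat 0 ≠ 0))) (k - c - 1) 0)
       else
         Except.ok ((js.filter (fun j => decide (p.getD j.toNat 0 ≠ 0))).foldl (fun q j => q.setIfInBounds j.toNat 0) p,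
           c + (js.filter (fun j => decide (p.getD j.toNat 0 ≠ 0))).length)) := by
  intro js
  induction js with
  | nil =>
    intro p c _ _
    simp only [List.filter_nil]
    rw [if_neg (by simp; omega)]
    simp [eraInner]
  | cons j rest ih =>
    intro p c hnd hb
    have hj := hb j (by simp)
    have hndr : rest.Nodup := (List.nodup_cons.mp hnd).2
    have hjr : j ∉ rest := (List.nodup_cons.mp hnd).1
    show (if p.getD j.toNat 0 ≠ 0 then
            (if c + 1 = k then Except.error j
             else eraInner k rest (p.setIfInBounds j.toNat 0) (c + 1))
          else eraInner k rest p c) = _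
    by_cases ht : p.getD j.toNat 0 ≠ 0
    · rw [if_pos ht]
      have hfil : List.filter (fun j' => decide (p.getD j'.toNat 0 ≠ 0)) (j :: rest)
          = j :: List.filter (fun j' => decide (p.getD j'.toNat 0 ≠ 0)) rest := by
        rw [List.filter_cons, if_pos (by simpa using ht)]
      rw [hfil]
      set mr := List.filter (fun j' => decide (p.getD j'.toNat 0 ≠ 0)) rest with hmr
      have hlen' : (p.setIfInBounds j.toNat 0).size = p.size := Array.size_setIfInBounds
      have hfil2 : List.filter (fun j' => decide ((p.setIfInBounds j.toNat 0).getD j'.toNat 0 ≠ 0)) rest = mr := by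
        rw [hmr]
        apply List.filter_congr
        intro x hx
        have hxb := hb x (by simp [hx])
        have hxj : x ≠ j := by rintro rfl; exact hjr hx
        rw [agetD_set_ne p j.toNat x.toNat 0 (by omega)]
      by_cases hk : c + 1 = k
      · rw [if_pos hk]
        rw [if_pos (by simp only [List.length_cons]; push_cast; omega)]
        have : k - c - 1 = 0 := by omega
        rw [this, PySem.List.pyGetD_zero_cons]
      · rw [if_neg hk]
        rw [ih (p.setIfInBounds j.toNat 0) (c + 1) hndr
            (by rw [hlen']; intro x hx; exact hb x (by simp [hx]))]
        simp only [hfil2]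
        by_cases hin : 1 ≤ k - (c + 1) ∧ k - (c + 1) ≤ (mr.length : Int)
        · rw [if_pos hin, if_pos (by simp only [List.length_cons]; push_cast; omega)]
          rw [pyGetD_cons_of_pos _ _ _ _ (by omega)]
          have e : k - (c + 1) - 1 = k - c - 1 - 1 := by omega
          rw [e]
        · rw [if_neg hin, if_neg (by simp only [List.length_cons]; push_cast; omega)]
          simp only [List.foldl_cons, List.length_cons]
          have e : c + 1 + (mr.length : Int) = c + (((mr.length + 1 : Nat)) : Int) := by push_cast; omega
          rw [e]
    · rw [if_neg ht]
      rw [ih p c hndr (by intro x hx; exact hb x (by simp [hx]))]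
      have hfil : List.filter (fun j' => decide (p.getD j'.toNat 0 ≠ 0)) (j :: rest)
          = List.filter (fun j' => decide (p.getD j'.toNat 0 ≠ 0)) rest := by
        rw [List.filter_cons, if_neg (by simpa using ht)]
      rw [hfil]

lemma dvd_toNat (a b : Int) (ha : 0 ≤ a) (hb : 0 ≤ b) (h : a ∣ b) : a.toNat ∣ b.toNat := by
  have h1 : ((a.toNat : Nat) : Int) ∣ ((b.toNat : Nat) : Int) := by
    have e1 : ((a.toNat : Nat) : Int) = a := by omega
    have e2 : ((b.toNat : Nat) : Int) = b := by omega
    rw [e1, e2]; exact h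
  exact_mod_cast h1

lemma prime_iff_minFac_eq (i : Int) (h2 : 2 ≤ i) : i.toNat.Prime ↔ (i.toNat.minFac : Int) = i := by
  constructor
  · intro hp
    rw [hp.minFac_eq]
    omega
  · intro he
    have : i.toNat.minFac = i.toNat := by omega
    rw [← this]
    exact Nat.minFac_prime (by omega)

lemma marksFrom_cons (num i : Int) (h : i ≤ num) :
    marksFrom num i = blockL num i ++ marksFrom num (i + 1) := by
  unfold marksFrom
  rw [PySem.List.pyRange_one_cons (by omega)]
  rw [List.flatMap_cons]

lemma blockL_nil_of_not_prime (num i : Int) (h2 : 2 ≤ i) (hnp : ¬ i.toNat.Prime) :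
    blockL num i = [] := by
  rw [List.eq_nil_iff_forall_not_mem]
  intro x hx
  have hx' := (mem_blockL num i x (by omega)).mp hx
  have hx2 : 2 ≤ x := by omega
  have hp : x.toNat.minFac.Prime := Nat.minFac_prime (by omega)
  have he : (x.toNat.minFac : Int) = i := by
    have := hx'.2.2.2
    unfold minFacI at this
    exact this
  have e : x.toNat.minFac = i.toNat := by omega
  rw [e] at hp
  exact hnp hp

lemma outer_lemma (num k : Int) : ∀ (fuel : Nat) (i : Int) (p : Array Int) (c : Int),
    2 ≤ i → (num + 1 - i).toNat ≤ fuel → SieveInv num i p →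
    eraOuter num k (PySem.List.pyRange i (num + 1) 1) p c = pick (marksFrom num i) (k - c) := by
  intro fuel
  induction fuel with
  | zero =>
    intro i p c h2 hf _
    have hni : num + 1 ≤ i := by omega
    rw [PySem.List.pyRange_one_eq_nil hni]
    unfold marksFrom
    rw [PySem.List.pyRange_one_eq_nil hni]
    simp [eraOuter, pick_nil]
  | succ fuel ih =>
    intro i p c h2 hf hInv
    by_cases hni : num + 1 ≤ i
    · rw [PySem.List.pyRange_one_eq_nil hni]
      unfold marksFrom
      rw [PySem.List.pyRange_one_eq_nil hni]
      simp [eraOuter, pick_nil]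
    · -- i ≤ num
      obtain ⟨hlen, hent⟩ := hInv
      have hlenI : (p.size : Int) = num + 1 := by
        rw [hlen]; omega
      have hidx : i.toNat < p.size := by omega
      rw [PySem.List.pyRange_one_cons (by omega)]
      show (if p.getD i.toNat 0 ≠ 0 then
              (match eraInner k (PySem.List.pyRange i (num + 1) i) p c with
               | .error j => some j
               | .ok (p', c') => eraOuter num k (PySem.List.pyRange (i + 1) (num + 1) 1) p' c')
            else eraOuter num k (PySem.List.pyRange (i + 1) (num + 1) 1) p c) = _
      have hget : p.getD i.toNat 0 = p[i.toNat] := by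
        rw [agetD_char, dif_pos hidx]
      have hval : p[i.toNat] = if 2 ≤ i.toNat ∧ ((i.toNat.minFac : Int) < i) then (0:Int) else 1 :=
        hent i.toNat hidx
      have hFle : i.toNat.minFac ≤ i.toNat := Nat.minFac_le (by omega)
      rw [marksFrom_cons num i (by omega)]
      by_cases hC : (i.toNat.minFac : Int) = i
      · -- i is prime: the inner loop runs
        have hcond : p.getD i.toNat 0 ≠ 0 := by
          rw [hget, hval, if_neg (by omega)]
          omega
        rw [if_pos hcond]
        have hjs_nodup : (PySem.List.pyRange i (num + 1) i).Nodup :=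
          (pyRange_pairwise_of_pos i (num + 1) i (by omega)).imp (fun h => ne_of_lt h)
        have hjs_mem : ∀ j ∈ PySem.List.pyRange i (num + 1) i, i ≤ j ∧ j < num + 1 ∧ i ∣ j := by
          intro j hj
          rw [PySem.List.mem_pyRange_iff_of_pos (by omega)] at hj
          exact ⟨hj.1, hj.2.1, dvd_sub_self_right.mp hj.2.2⟩
        have hjs_b : ∀ j ∈ PySem.List.pyRange i (num + 1) i, 0 ≤ j ∧ j < (p.size : Int) := by
          intro j hj
          have := hjs_mem j hj
          omega
        rw [inner_lemma k (PySem.List.pyRange i (num + 1) i) p c hjs_nodup hjs_b]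
        have hfilter : (PySem.List.pyRange i (num + 1) i).filter
            (fun j => decide (p.getD j.toNat 0 ≠ 0)) = blockL num i := by
          unfold blockL
          apply List.filter_congr
          intro x hx
          have hxm := hjs_mem x hx
          have hx2 : 2 ≤ x := by omega
          have hxidx : x.toNat < p.size := by omega
          have hgx : p.getD x.toNat 0 = p[x.toNat] := by
            rw [agetD_char, dif_pos hxidx]
          have hvx := hent x.toNat hxidx
          have hdvd : i.toNat ∣ x.toNat := dvd_toNat i x (by omega) (by omega) hxm.2.2
          have hmle : x.toNat.minFac ≤ i.toNat := Nat.minFac_le_of_dvd (by omega) hdvd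
          rw [decide_eq_decide]
          rw [hgx, hvx]
          unfold minFacI
          by_cases hlt : ((x.toNat.minFac : Nat) : Int) < i
          · rw [if_pos ⟨by omega, hlt⟩]
            constructor
            · intro h0; exact absurd rfl h0
            · intro hei; omega
          · rw [if_neg (by omega)]
            constructor
            · intro _; omega
            · intro _; omega
        rw [hfilter, pick_append]
        by_cases hin : 1 ≤ k - c ∧ k - c ≤ ((blockL num i).length : Int)
        · rw [if_pos hin, if_pos hin]
        · rw [if_neg hin, if_neg hin]
          show eraOuter num k (PySem.List.pyRange (i + 1) (num + 1) 1)
              ((blockL num i).foldl (fun q j => q.setIfInBounds j.toNat 0) p) (c + (blockL num i).length) = _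
          have hbb : ∀ j ∈ blockL num i, 0 ≤ j ∧ j < (p.size : Int) := by
            intro j hj
            have := (mem_blockL num i j (by omega)).mp hj
            omega
          have hInv' : SieveInv num (i + 1) ((blockL num i).foldl (fun q j => q.setIfInBounds j.toNat 0) p) := by
            constructor
            · rw [afoldl_set_size]; exact hlen
            · intro m hm
              have hm' : m < p.size := by rwa [afoldl_set_size] at hm
              have hq := afoldl_set_get? (blockL num i) p m hbb
              rw [Array.getElem?_eq_getElem hm] at hq
              by_cases hmem : (m : Int) ∈ blockL num i
              · rw [if_pos hmem] at hq
                have hmb := (mem_blockL num i (m : Int) (by omega)).mp hmem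
                have e : ((m : Int)).toNat = m := by omega
                have he2 : (m.minFac : Int) = i := by
                  have := hmb.2.2.2
                  unfold minFacI at this
                  rwa [e] at this
                rw [if_pos ⟨by omega, by omega⟩]
                exact Option.some.inj hq
              · rw [if_neg hmem, Array.getElem?_eq_getElem hm'] at hq
                have hpm := hent m hm'
                have hv := Option.some.inj hq
                rw [hv, hpm]
                by_cases hm2 : 2 ≤ m
                · by_cases hlt : (m.minFac : Int) < i
                  · rw [if_pos ⟨hm2, hlt⟩, if_pos ⟨hm2, by omega⟩]
                  · have hne : (m.minFac : Int) ≠ i := by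
                      intro he
                      apply hmem
                      have hmdvd : (i : Int) ∣ (m : Int) := by
                        have h1 : (m.minFac : Nat) ∣ m := Nat.minFac_dvd m
                        have h2' : ((m.minFac : Nat) : Int) ∣ ((m : Nat) : Int) := Int.natCast_dvd_natCast.mpr h1
                        rwa [he] at h2'
                      have hile : i ≤ (m : Int) := by
                        have : m.minFac ≤ m := Nat.minFac_le (by omega)
                        omega
                      rw [mem_blockL num i (m : Int) (by omega)]
                      refine ⟨hile, by omega, hmdvd, ?_⟩
                      unfold minFacI
                      have e : ((m : Int)).toNat = m := by omega
                      rw [e]; exact he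
                    rw [if_neg (by omega), if_neg (by omega)]
                · rw [if_neg (by omega), if_neg (by omega)]
          rw [ih (i + 1) _ _ (by omega) (by omega) hInv']
          have e : k - (c + ((blockL num i).length : Int)) = k - c - (blockL num i).length := by ring
          rw [e]
      · -- i is composite: prime[i] = 0, the pass is skipped and strikes nothing
        have hcond : ¬ (p.getD i.toNat 0 ≠ 0) := by
          rw [hget, hval, if_pos ⟨by omega, by omega⟩]
          omega
        rw [if_neg hcond]
        have hnp : ¬ i.toNat.Prime := fun hp => hC ((prime_iff_minFac_eq i h2).mp hp)
        rw [blockL_nil_of_not_prime num i h2 hnp, List.nil_append]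
        have hInv' : SieveInv num (i + 1) p := by
          refine ⟨hlen, ?_⟩
          intro m hm
          rw [hent m hm]
          by_cases hm2 : 2 ≤ m
          · by_cases hlt : (m.minFac : Int) < i
            · rw [if_pos ⟨hm2, hlt⟩, if_pos ⟨hm2, by omega⟩]
            · have hne : (m.minFac : Int) ≠ i := by
                intro he
                have hp : m.minFac.Prime := Nat.minFac_prime (by omega)
                have hip : i.toNat.Prime := by
                  have e : m.minFac = i.toNat := by omega
                  rwa [e] at hp
                exact hnp hip
              rw [if_neg (by omega), if_neg (by omega)]
          · rw [if_neg (by omega), if_neg (by omega)]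
        exact ih (i + 1) p c (by omega) (by omega) hInv'

lemma era_char (num k : Int) : era num k = pick (marks num) k := by
  unfold era
  have hInv : SieveInv num 2 (Array.replicate (num + 1).toNat (1 : Int)) := by
    refine ⟨Array.size_replicate, ?_⟩
    intro m hm
    rw [Array.getElem_replicate]
    rw [if_neg ?_]
    rintro ⟨h2, hlt⟩
    have hp : m.minFac.Prime := Nat.minFac_prime (by omega)
    have := hp.two_le
    omega
  rw [outer_lemma num k (num + 1 - 2).toNat 2 _ 0 (by omega) (by omega) hInv]
  unfold marks
  have e : k - 0 = k := by ring
  rw [e]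

lemma spfInner_size (i : Int) (js : List Int) (t : Array Int) : (spfInner i js t).size = t.size := by
  induction js generalizing t with
  | nil => rfl
  | cons j rest ih =>
    show (if t.getD j.toNat 0 = 0 then spfInner i rest (t.setIfInBounds j.toNat i) else spfInner i rest t).size = t.size
    by_cases h : t.getD j.toNat 0 = 0
    · rw [if_pos h, ih]
      exact Array.size_setIfInBounds
    · rw [if_neg h, ih]

lemma spfInner_get? (i : Int) (hi : i ≠ 0) : ∀ (js : List Int) (t : Array Int), (∀ j ∈ js, 0 ≤ j) →
    ∀ m : Nat, (spfInner i js t)[m]? = if ((m : Int) ∈ js ∧ t[m]? = some 0) then some i else t[m]? := by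
  intro js
  induction js with
  | nil =>
    intro t _ m
    rw [if_neg (by simp)]
    rfl
  | cons j rest ih =>
    intro t hb m
    have hj := hb j (by simp)
    show (if t.getD j.toNat 0 = 0 then spfInner i rest (t.setIfInBounds j.toNat i) else spfInner i rest t)[m]? = _
    by_cases h : t.getD j.toNat 0 = 0
    · rw [if_pos h]
      rw [ih (t.setIfInBounds j.toNat i) (by intro x hx; exact hb x (by simp [hx])) m]
      by_cases hmj : j.toNat = m
      · -- the entry just written
        by_cases hr : m < t.size
        ·
          have ht0 : t[m]? = some 0 := by
            rw [Array.getElem?_eq_getElem hr]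
            congr 1
            have e1 : t.getD m 0 = t[m] := by rw [agetD_char, dif_pos hr]
            rw [← e1, ← hmj]
            exact h
          have hset : (t.setIfInBounds j.toNat i)[m]? = some i := by
            rw [Array.getElem?_setIfInBounds, if_pos hmj, if_pos (by omega)]
          rw [hset]
          rw [if_neg (by rintro ⟨-, hcc⟩; exact hi (Option.some.inj hcc))]
          rw [if_pos ⟨by simp; omega, ht0⟩]
        · have hnone : t[m]? = none := by
            rw [Array.getElem?_eq_none_iff]
            omega
          have hset : (t.setIfInBounds j.toNat i)[m]? = none := by
            rw [Array.getElem?_setIfInBounds, if_pos hmj, if_neg (by omega)]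
          rw [hset, hnone]
          rw [if_neg (by rintro ⟨-, hcc⟩; cases hcc)]
          rw [if_neg (by rintro ⟨-, hcc⟩; cases hcc)]
      · -- m ≠ j.toNat: the write does not touch m
        have hset : (t.setIfInBounds j.toNat i)[m]? = t[m]? := by
          rw [Array.getElem?_setIfInBounds, if_neg hmj]
        rw [hset]
        have hmem : ((m : Int) ∈ j :: rest) ↔ ((m : Int) ∈ rest) := by
          simp only [List.mem_cons, or_iff_right_iff_imp]
          intro he
          exfalso
          exact hmj (by omega)
        by_cases hc : (m : Int) ∈ rest ∧ t[m]? = some 0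
        · rw [if_pos hc, if_pos ⟨hmem.mpr hc.1, hc.2⟩]
        · rw [if_neg hc, if_neg (by rintro ⟨h1, h2⟩; exact hc ⟨hmem.mp h1, h2⟩)]
    · rw [if_neg h]
      rw [ih t (by intro x hx; exact hb x (by simp [hx])) m]
      have hjm : ¬ ((m : Int) = j ∧ t[m]? = some 0) := by
        rintro ⟨h1, h2⟩
        have hmj : j.toNat = m := by omega
        apply h
        have hr : m < t.size := by
          by_contra hr
          rw [Array.getElem?_eq_none_iff.mpr (by omega)] at h2
          cases h2
        rw [Array.getElem?_eq_getElem hr] at h2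
        have e1 : t.getD j.toNat 0 = t.getD m 0 := by rw [hmj]
        rw [e1, agetD_char, dif_pos hr]
        exact Option.some.inj h2
      by_cases hc : (m : Int) ∈ rest ∧ t[m]? = some 0
      · rw [if_pos hc, if_pos ⟨by simp [hc.1], hc.2⟩]
      · rw [if_neg hc, if_neg ?_]
        rintro ⟨h1, h2⟩
        rcases List.mem_cons.mp h1 with h1 | h1
        · exact hjm ⟨h1, h2⟩
        · exact hc ⟨h1, h2⟩

lemma spfOuter_inv (num : Int) : ∀ (fuel : Nat) (i : Int) (t : Array Int),
    2 ≤ i → (num + 1 - i).toNat ≤ fuel → SpfInv num i t →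
    SpfInv num (num + 1) (spfOuter num (PySem.List.pyRange i (num + 1) 1) t) := by
  intro fuel
  induction fuel with
  | zero =>
    intro i t h2 hf hInv
    have hni : num + 1 ≤ i := by omega
    rw [PySem.List.pyRange_one_eq_nil hni]
    show SpfInv num (num + 1) t
    obtain ⟨hlen, hent⟩ := hInv
    refine ⟨hlen, ?_⟩
    intro m hm
    rw [hent m hm]
    by_cases hm2 : 2 ≤ m
    · have hle : m.minFac ≤ m := Nat.minFac_le (by omega)
      rw [if_pos ⟨hm2, by omega⟩, if_pos ⟨hm2, by omega⟩]
    · rw [if_neg (by omega), if_neg (by omega)]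
  | succ fuel ih =>
    intro i t h2 hf hInv
    by_cases hni : num + 1 ≤ i
    · rw [PySem.List.pyRange_one_eq_nil hni]
      show SpfInv num (num + 1) t
      obtain ⟨hlen, hent⟩ := hInv
      refine ⟨hlen, ?_⟩
      intro m hm
      rw [hent m hm]
      by_cases hm2 : 2 ≤ m
      · have hle : m.minFac ≤ m := Nat.minFac_le (by omega)
        rw [if_pos ⟨hm2, by omega⟩, if_pos ⟨hm2, by omega⟩]
      · rw [if_neg (by omega), if_neg (by omega)]
    · obtain ⟨hlen, hent⟩ := hInv
      have hlenI : (t.size : Int) = num + 1 := by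
        rw [hlen]; omega
      have hidx : i.toNat < t.size := by omega
      rw [PySem.List.pyRange_one_cons (by omega)]
      show SpfInv num (num + 1)
        (if t.getD i.toNat 0 = 0 then
           spfOuter num (PySem.List.pyRange (i + 1) (num + 1) 1) (spfInner i (PySem.List.pyRange i (num + 1) i) t)
         else spfOuter num (PySem.List.pyRange (i + 1) (num + 1) 1) t)
      have hget : t.getD i.toNat 0 = t[i.toNat] := by
        rw [agetD_char, dif_pos hidx]
      have hval := hent i.toNat hidx
      have hFle : i.toNat.minFac ≤ i.toNat := Nat.minFac_le (by omega)
      by_cases hC : (i.toNat.minFac : Int) = i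
      · -- i is prime: the inner loop fills in this spf value
        have hcond : t.getD i.toNat 0 = 0 := by
          rw [hget, hval, if_neg (by omega)]
        rw [if_pos hcond]
        have hjs_mem : ∀ j ∈ PySem.List.pyRange i (num + 1) i, i ≤ j ∧ j < num + 1 ∧ i ∣ j := by
          intro j hj
          rw [PySem.List.mem_pyRange_iff_of_pos (by omega)] at hj
          exact ⟨hj.1, hj.2.1, dvd_sub_self_right.mp hj.2.2⟩
        have hInv' : SpfInv num (i + 1) (spfInner i (PySem.List.pyRange i (num + 1) i) t) := by
          refine ⟨by rw [spfInner_size]; exact hlen, ?_⟩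
          intro m hm
          have hm' : m < t.size := by rwa [spfInner_size] at hm
          have hq := spfInner_get? i (by omega) (PySem.List.pyRange i (num + 1) i) t
            (by intro j hj; have := hjs_mem j hj; omega) m
          rw [Array.getElem?_eq_getElem hm] at hq
          by_cases hmem : (m : Int) ∈ PySem.List.pyRange i (num + 1) i ∧ t[m]? = some 0
          · rw [if_pos hmem] at hq
            have hmi := hjs_mem (m : Int) hmem.1
            have hm2 : 2 ≤ m := by omega
            have ht0 : t[m]'hm' = (0 : Int) := by
              have h9 := hmem.2
              rw [Array.getElem?_eq_getElem hm'] at h9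
              exact Option.some.inj h9
            have hnotlt : ¬ ((m.minFac : Int) < i) := by
              intro hlt
              have := hent m hm'
              rw [if_pos ⟨hm2, hlt⟩] at this
              rw [this] at ht0
              have hp : m.minFac.Prime := Nat.minFac_prime (by omega)
              have := hp.two_le
              omega
            have hdvd : i.toNat ∣ m := by
              have := dvd_toNat i (m : Int) (by omega) (by omega) hmi.2.2
              simpa using this
            have hmle : m.minFac ≤ i.toNat := Nat.minFac_le_of_dvd (by omega) hdvd
            have heq : (m.minFac : Int) = i := by omega
            rw [if_pos ⟨hm2, by omega⟩]
            rw [Option.some.inj hq, heq]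
          · rw [if_neg hmem] at hq
            rw [Array.getElem?_eq_getElem hm'] at hq
            have hv := Option.some.inj hq
            rw [hv, hent m hm']
            by_cases hm2 : 2 ≤ m
            · by_cases hlt : (m.minFac : Int) < i
              · rw [if_pos ⟨hm2, hlt⟩, if_pos ⟨hm2, by omega⟩]
              · have hne : (m.minFac : Int) ≠ i := by
                  intro he
                  apply hmem
                  constructor
                  · rw [PySem.List.mem_pyRange_iff_of_pos (by omega)]
                    have h1 : (m.minFac : Nat) ∣ m := Nat.minFac_dvd m
                    have h2' : ((m.minFac : Nat) : Int) ∣ ((m : Nat) : Int) := Int.natCast_dvd_natCast.mpr h1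
                    rw [he] at h2'
                    have hle : m.minFac ≤ m := Nat.minFac_le (by omega)
                    exact ⟨by omega, by omega, dvd_sub h2' (dvd_refl i)⟩
                  · rw [Array.getElem?_eq_getElem hm', hent m hm', if_neg (by omega)]
                rw [if_neg (by omega), if_neg (by omega)]
            · rw [if_neg (by omega), if_neg (by omega)]
        exact ih (i + 1) _ (by omega) (by omega) hInv'
      · -- i is composite: spf[i] ≠ 0 already, the pass is skipped
        have hnp : ¬ i.toNat.Prime := fun hp => hC ((prime_iff_minFac_eq i h2).mp hp)
        have hlti : (i.toNat.minFac : Int) < i := by omega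
        have hcond : ¬ (t.getD i.toNat 0 = 0) := by
          rw [hget, hval, if_pos ⟨by omega, hlti⟩]
          have hp : i.toNat.minFac.Prime := Nat.minFac_prime (by omega)
          have := hp.two_le
          omega
        rw [if_neg hcond]
        have hInv' : SpfInv num (i + 1) t := by
          refine ⟨hlen, ?_⟩
          intro m hm
          rw [hent m hm]
          by_cases hm2 : 2 ≤ m
          · by_cases hlt : (m.minFac : Int) < i
            · rw [if_pos ⟨hm2, hlt⟩, if_pos ⟨hm2, by omega⟩]
            · have hne : (m.minFac : Int) ≠ i := by
                intro he
                have hp : m.minFac.Prime := Nat.minFac_prime (by omega)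
                have hip : i.toNat.Prime := by
                  have e : m.minFac = i.toNat := by omega
                  rwa [e] at hp
                exact hnp hip
              rw [if_neg (by omega), if_neg (by omega)]
          · rw [if_neg (by omega), if_neg (by omega)]
        exact ih (i + 1) t (by omega) (by omega) hInv'

lemma spfTab_final (num : Int) :
    SpfInv num (num + 1)
      (spfOuter num (PySem.List.pyRange 2 (num + 1) 1) (Array.replicate (num + 1).toNat 0)) := by
  refine spfOuter_inv num (num + 1 - 2).toNat 2 _ (by omega) (by omega) ⟨Array.size_replicate, ?_⟩
  intro m hm
  rw [Array.getElem_replicate]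
  rw [if_neg ?_]
  rintro ⟨h2, hlt⟩
  have hp : m.minFac.Prime := Nat.minFac_prime (by omega)
  have := hp.two_le
  omega

lemma mergeSort_eq_marks (num : Int) :
    (((PySem.List.pyRange 2 (num + 1) 1).map
        (fun v => ((spfOuter num (PySem.List.pyRange 2 (num + 1) 1) (Array.replicate (num + 1).toNat 0)).getD v.toNat 0, v))).mergeSort
      (fun a b => decide (a.1 < b.1 ∨ (a.1 = b.1 ∧ a.2 ≤ b.2)))) =
      (marks num).map (fun v => (minFacI v, v)) := by
  obtain ⟨hlen, hent⟩ := spfTab_final num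
  set tab := spfOuter num (PySem.List.pyRange 2 (num + 1) 1) (Array.replicate (num + 1).toNat 0) with htab
  have hmapeq : (PySem.List.pyRange 2 (num + 1) 1).map (fun v => (tab.getD v.toNat 0, v))
      = (PySem.List.pyRange 2 (num + 1) 1).map (fun v => (minFacI v, v)) := by
    apply List.map_congr_left
    intro v hv
    rw [PySem.List.mem_pyRange_one] at hv
    have hvidx : v.toNat < tab.size := by omega
    have hg : tab.getD v.toNat 0 = tab[v.toNat] := by
      rw [agetD_char, dif_pos hvidx]
    have hle : v.toNat.minFac ≤ v.toNat := Nat.minFac_le (by omega)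
    rw [hg, hent v.toNat hvidx, if_pos ⟨by omega, by omega⟩]
    unfold minFacI
    rfl
  rw [hmapeq]
  refine List.Perm.eq_of_pairwise (le := fun a b => (decide (a.1 < b.1 ∨ (a.1 = b.1 ∧ a.2 ≤ b.2)) = true)) ?_ ?_ ?_ ?_
  · intro a b _ _ hab hba
    simp only [decide_eq_true_eq] at hab hba
    have h1 : a.1 = b.1 := by omega
    have h2 : a.2 = b.2 := by omega
    exact Prod.ext h1 h2
  · exact List.pairwise_mergeSort
      (by intro a b c hab hbc; simp only [decide_eq_true_eq] at *; omega)
      (by intro a b; simp only [Bool.or_eq_true, decide_eq_true_eq]; omega) _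
  · rw [List.pairwise_map]
    refine List.Pairwise.imp_of_mem ?_ (marks_pairwise num)
    intro a b _ _ h
    simp only [decide_eq_true_eq]
    rcases h with h | h
    · exact Or.inl h
    · exact Or.inr ⟨h.1, by omega⟩
  · exact (List.mergeSort_perm _ _).trans ((marks_perm num).symm.map _)

lemma era_alt_char (num k : Int) : era_alt num k = pick (marks num) k := by
  unfold era_alt
  simp only [mergeSort_eq_marks]
  have hmm : ((marks num).map (fun v => (minFacI v, v))).map (fun x => x.2) = marks num := by
    rw [List.map_map]
    have e : ((fun x : Int × Int => x.2) ∘ fun v : Int => (minFacI v, v)) = fun v : Int => v := rfl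
    rw [e]
    exact List.map_id' _
  rw [hmm]
  unfold pick
  by_cases h : 1 ≤ k ∧ k ≤ ((marks num).length : Int)
  · rw [if_pos h, if_pos h]
    rw [PySem.List.pyGet?_eq_some_getElem _ (by omega) (by omega)]
    rw [PySem.List.pyGetD_eq_getElem _ _ (by omega) (by omega)]
  · rw [if_neg h, if_neg h]

-- ===== VERDICT (by name: the statement is the Claim_ definition above) =====
theorem era_spec : Claim_equal_era := by
  intro num k _
  unfold Spec_era
  rw [era_char, era_alt_char]
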